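-- pv_equiv track=rewrite | github.com/mnglaura/HackerRank | climbing_leaderboard.py | count_rank
-- ===== SOURCE A (Python) =====
-- def count_rank(scores, alice_score):
--     index = -1
--
--     for i in range(0, len(scores)):
--         if alice_score <= scores[i]:
--             continue
--         else:
--             index = i
--             break
--
--     if index == -1:
--         index = len(scores)
--
--     scores.insert(index, alice_score)
--
--     rank = 1
--
--     for i in range(1, index+1):
--         if scores[i] < scores[i-1]:
--             rank += 1
--
--     return rank
-- ===== SOURCE B (Python) =====
-- def count_rank(scores, alice_score):
--     # One fused pass with a prev/rank accumulator instead of A's two staged index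
--     # loops: scan the leading block of scores >= alice_score, counting strict drops
--     # on the fly, then account for the boundary drop onto alice_score.
--     rank = 1
--     prev = None
--     index = 0
--     for s in scores:
--         if s < alice_score:
--             break
--         if prev is not None and s < prev:
--             rank += 1
--         prev = s
--         index += 1
--     scores.insert(index, alice_score)  # same in-place mutation as A
--     if prev is not None and alice_score < prev:
--         rank += 1
--     return rank
-- ===== Notes on version B (the rewrite author's own statement) =====
-- stated objective: simpler
-- what changed: A's two staged index loops (a sentinel break-search for the insertion index, then a second loop re-indexing the mutated list pairwise) are fused into one direct pass over the original elements with prev/rank accumulators and a single boundary comparison; no index arithmetic and no re-read of the mutated list.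
import Mathlib
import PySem

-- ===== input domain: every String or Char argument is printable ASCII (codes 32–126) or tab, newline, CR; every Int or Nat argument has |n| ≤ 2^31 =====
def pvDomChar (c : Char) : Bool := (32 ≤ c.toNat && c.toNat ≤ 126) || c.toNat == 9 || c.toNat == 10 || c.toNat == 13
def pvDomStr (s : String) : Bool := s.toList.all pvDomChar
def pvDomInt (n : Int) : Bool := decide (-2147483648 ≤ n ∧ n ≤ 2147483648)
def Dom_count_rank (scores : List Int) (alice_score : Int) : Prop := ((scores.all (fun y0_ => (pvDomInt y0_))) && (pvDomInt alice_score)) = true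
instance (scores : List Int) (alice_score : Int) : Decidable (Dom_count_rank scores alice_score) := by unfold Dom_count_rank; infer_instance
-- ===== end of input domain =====

-- B fuses A's two staged index loops (sentinel break-search for the insertion index,
-- then a pairwise re-scan of the mutated list) into one pass over the original
-- elements with prev/rank accumulators plus a final boundary comparison (simpler;
-- same O(n) cost). Equivalence is about the RETURN value; both Pythons perform the
-- identical in-place insert on `scores`.

-- ===== PORT A =====
-- the 'for i in range(...)' with continue/break, as structural recursion over the range list
def count_rank_findA (scores : List Int) (alice_score : Int) : List Int → Int
  | [] => -1
  | i :: rest =>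
    if alice_score ≤ PySem.List.pyGetD scores i 0 then count_rank_findA scores alice_score rest
    else i

def count_rank (scores : List Int) (alice_score : Int) : Int :=
  let index0 := count_rank_findA scores alice_score (PySem.List.pyRange 0 (scores.length : Int) 1)
  let index := if index0 = -1 then (scores.length : Int) else index0
  let scores2 := PySem.List.insert scores index alice_score
  (PySem.List.pyRange 1 (index + 1) 1).foldl
    (fun rank i =>
      if PySem.List.pyGetD scores2 i 0 < PySem.List.pyGetD scores2 (i - 1) 0 then rank + 1
      else rank) 1

-- ===== PORT B =====
-- Source B's single for-loop with break, as structural recursion over the list,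
-- carrying (rank, prev, index); index only drives the in-place insert, which this
-- return-value port does not model.
def count_rank_alt_go (alice_score : Int) : List Int → Int → Option Int → Int → (Int × Option Int × Int)
  | [], rank, prev, index => (rank, prev, index)
  | s :: rest, rank, prev, index =>
    if s < alice_score then (rank, prev, index)
    else
      count_rank_alt_go alice_score rest
        (match prev with
         | some p => if s < p then rank + 1 else rank
         | none => rank)
        (some s) (index + 1)

def count_rank_alt (scores : List Int) (alice_score : Int) : Int :=
  let r := count_rank_alt_go alice_score scores 1 none 0
  match r.2.1 with
  | some p => if alice_score < p then r.1 + 1 else r.1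
  | none => r.1

-- ===== PRECONDITION & SPEC =====
def Spec_count_rank (scores : List Int) (alice_score : Int) (out : Int) : Prop := out = count_rank_alt scores alice_score
instance (scores : List Int) (alice_score : Int) (out : Int) : Decidable (Spec_count_rank scores alice_score out) := by unfold Spec_count_rank; infer_instance

-- ===== CLAIM (what is proved, stated in full; the proofs are below) =====
def Claim_equal_count_rank : Prop := ∀ (scores : List Int) (alice_score : Int), Dom_count_rank scores alice_score → Spec_count_rank scores alice_score (count_rank scores alice_score)

-- ===== LEMMAS AND PROOFS =====

-- number of adjacent strict decreases in a list
def pvDesc : List Int → Int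
  | x :: y :: t => (if y < x then 1 else 0) + pvDesc (y :: t)
  | _ => 0

-- A's break-loop over the range starting at pre.length, characterised by takeWhile of the suffix
theorem findA_spec (a : Int) : ∀ (suf pre : List Int),
    count_rank_findA (pre ++ suf) a
      (PySem.List.pyRange (pre.length : Int) ((pre ++ suf).length : Int) 1)
    = if suf.takeWhile (fun s => a ≤ s) = suf then -1
      else (pre.length : Int) + ((suf.takeWhile (fun s => a ≤ s)).length : Int) := by
  intro suf
  induction suf with
  | nil =>
    intro pre
    simp [PySem.List.pyRange_one_eq_nil, count_rank_findA]
  | cons s rest ih =>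
    intro pre
    have hlt : (pre.length : Int) < ((pre ++ s :: rest).length : Int) := by
      simp
    rw [PySem.List.pyRange_one_cons hlt]
    have hget : PySem.List.pyGetD (pre ++ s :: rest) (pre.length : Int) 0 = s := by
      simp [PySem.List.pyGetD_natCast]
    by_cases h : a ≤ s
    · have := ih (pre ++ [s])
      simp only [List.append_assoc, List.cons_append, List.nil_append] at this
      have hlen : ((pre ++ [s]).length : Int) = (pre.length : Int) + 1 := by simp
      rw [count_rank_findA, hget, if_pos h]
      rw [hlen] at this
      rw [this]
      simp only [List.takeWhile_cons, h]
      by_cases h2 : rest.takeWhile (fun s => a ≤ s) = rest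
      · simp [h2]
      · have h3 : ¬ (s :: rest.takeWhile (fun s => a ≤ s) = s :: rest) := by
          simpa using h2
        simp only [h2, if_false, decide_true, if_true, h3]
        simp
        omega
    · rw [count_rank_findA, hget, if_neg h]
      have h3 : ¬ ((s :: rest).takeWhile (fun s => a ≤ s) = s :: rest) := by
        simp [h]
      simp [h]

-- pairwise zip count over a list = index-based count of adjacent strict decreases
theorem zip_pairs_countP (L : List Int) :
    (L.zip (L.drop 1)).countP (fun p => decide (p.2 < p.1))
    = (List.range (L.length - 1)).countP
        (fun j => decide (L.getD (j+1) 0 < L.getD j 0)) := by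
  induction L with
  | nil => simp
  | cons x t ih =>
    cases t with
    | nil => simp
    | cons y ys =>
      have := ih
      simp only [List.drop_succ_cons, List.drop_zero, List.zip_cons_cons,
        List.countP_cons, List.length_cons, Nat.add_sub_cancel] at this ⊢
      rw [List.range_succ_eq_map, List.countP_cons, List.countP_map, this]
      simp [Function.comp_def, Nat.add_comm]
      rfl

-- pvDesc, through the zip form, equals the index-based count
theorem pvDesc_eq_countP (L : List Int) :
    pvDesc L = (((List.range (L.length - 1)).countP
        (fun j => decide (L.getD (j+1) 0 < L.getD j 0))) : Int) := by
  rw [← zip_pairs_countP]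
  induction L with
  | nil => simp [pvDesc]
  | cons x t ih =>
    cases t with
    | nil => simp [pvDesc]
    | cons y ys =>
      simp only [List.drop_succ_cons, List.drop_zero, List.zip_cons_cons,
        List.countP_cons, pvDesc] at ih ⊢
      rw [ih]
      by_cases h : y < x <;> simp [h] <;> push_cast <;> ring

theorem getD_append_left' (xs ys : List Int) (m : Nat) (h : m < xs.length) :
    (xs ++ ys).getD m 0 = xs.getD m 0 := by
  simp [List.getD_eq_getElem?_getD, List.getElem?_append_left h]

-- A's value, in closed form over ext = scores.take k ++ [a]
theorem A_val (scores : List Int) (a : Int) :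
    count_rank scores a
    = 1 + (((List.range (scores.takeWhile (fun s => a ≤ s)).length).countP
        (fun j => decide ((scores.take (scores.takeWhile (fun s => a ≤ s)).length ++ [a]).getD (j+1) 0
                        < (scores.take (scores.takeWhile (fun s => a ≤ s)).length ++ [a]).getD j 0))) : Int) := by
  have hA := findA_spec a scores []
  simp only [List.nil_append, List.length_nil, Nat.cast_zero] at hA
  set k := (scores.takeWhile (fun s => a ≤ s)).length with hk
  have hkle : k ≤ scores.length := (List.takeWhile_sublist _).length_le
  have hlentake : (scores.take k).length = k := by simp [hkle]
  have hidx : (if count_rank_findA scores a (PySem.List.pyRange 0 (scores.length : Int) 1) = -1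
      then (scores.length : Int)
      else count_rank_findA scores a (PySem.List.pyRange 0 (scores.length : Int) 1)) = (k : Int) := by
    rw [hA]
    by_cases hfull : scores.takeWhile (fun s => a ≤ s) = scores
    · rw [if_pos hfull]
      simp [hk, hfull]
    · rw [if_neg hfull]
      simp
  unfold count_rank
  simp only [hidx]
  rw [PySem.List.insert_natCast scores k a hkle]
  rw [PySem.List.foldl_ite_add_one]
  have hrange : PySem.List.pyRange 1 ((k : Int) + 1) 1
      = (List.range k).map (fun j : Nat => 1 + (j : Int)) := by
    rw [PySem.List.pyRange_one]
    simp
  rw [hrange, List.countP_map]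
  congr 1
  exact_mod_cast List.countP_congr (fun j hj => by
    have hjk : j < k := List.mem_range.mp hj
    have h1 : ((1 + j : Nat) : Int) = ((j + 1 : Nat) : Int) := by push_cast; ring
    have h2 : ((1 + j : Nat) : Int) - 1 = ((j : Nat) : Int) := by push_cast; ring
    have hsplit : scores.take k ++ a :: scores.drop k
        = (scores.take k ++ [a]) ++ scores.drop k := by simp
    rw [Function.comp_apply, h2, h1, PySem.List.pyGetD_natCast, PySem.List.pyGetD_natCast,
      hsplit, getD_append_left' _ _ (j+1) (by simp [hlentake]; omega),
      getD_append_left' _ _ j (by simp [hlentake]; omega)])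

-- pvDesc over an optional previous element consed in front
def pvDescO : Option Int → List Int → Int
  | none, t => pvDesc t
  | some p, t => pvDesc (p :: t)

-- last element of (prev ;; t)
def pvLastO (prev : Option Int) (t : List Int) : Option Int :=
  match t.getLast? with
  | some x => some x
  | none => prev

-- B's loop, characterised: it walks exactly the takeWhile prefix, accumulating drops
theorem altGo_spec (a : Int) : ∀ (xs : List Int) (rank : Int) (prev : Option Int) (index : Int),
    count_rank_alt_go a xs rank prev index
    = (rank + pvDescO prev (xs.takeWhile (fun s => a ≤ s)),
       pvLastO prev (xs.takeWhile (fun s => a ≤ s)),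
       index + ((xs.takeWhile (fun s => a ≤ s)).length : Int)) := by
  intro xs
  induction xs with
  | nil =>
    intro rank prev index
    cases prev <;> simp [count_rank_alt_go, pvDescO, pvLastO, pvDesc]
  | cons s rest ih =>
    intro rank prev index
    by_cases h : s < a
    · have hnot : ¬ a ≤ s := not_le.mpr h
      cases prev <;>
        simp [count_rank_alt_go, h, hnot, pvDescO, pvLastO, pvDesc]
    · have hle : a ≤ s := not_lt.mp h
      simp only [count_rank_alt_go, if_neg h]
      rw [ih]
      simp only [List.takeWhile_cons, hle, decide_true, if_true, Prod.mk.injEq]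
      refine ⟨?_, ?_, by push_cast [List.length_cons]; ring⟩
      · cases prev with
        | none => simp [pvDescO]
        | some p =>
          simp only [pvDescO, pvDesc]
          by_cases hsp : s < p <;> simp [hsp] <;> ring
      · cases htw : rest.takeWhile (fun s => a ≤ s) with
        | nil => simp [pvLastO]
        | cons z zs => simp [pvLastO, List.getLast?_cons]

-- appending the boundary element to the prefix adds its drop, keyed by the last element
theorem pvDesc_snoc (a : Int) : ∀ (t : List Int),
    pvDesc (t ++ [a])
    = pvDesc t + (match t.getLast? with
                  | none => 0
                  | some p => if a < p then 1 else 0) := by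
  intro t
  induction t with
  | nil => simp [pvDesc]
  | cons x xs ih =>
    cases xs with
    | nil => simp [pvDesc]
    | cons y ys =>
      have : (x :: y :: ys) ++ [a] = x :: ((y :: ys) ++ [a]) := by simp
      rw [this]
      show (if y < x then (1:Int) else 0) + pvDesc ((y :: ys) ++ [a]) = _
      rw [ih]
      simp only [List.getLast?_cons_cons, pvDesc]
      ring

-- take of the takeWhile-length is the takeWhile prefix itself
theorem take_takeWhile_len (a : Int) (scores : List Int) :
    scores.take (scores.takeWhile (fun s => a ≤ s)).length
      = scores.takeWhile (fun s => a ≤ s) := by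
  induction scores with
  | nil => simp
  | cons x t ih =>
    by_cases hx : a ≤ x <;> simp [List.takeWhile_cons, hx, ih]

-- B's value, in the same closed form
theorem B_val (scores : List Int) (a : Int) :
    count_rank_alt scores a
    = 1 + (((List.range (scores.takeWhile (fun s => a ≤ s)).length).countP
        (fun j => decide ((scores.take (scores.takeWhile (fun s => a ≤ s)).length ++ [a]).getD (j+1) 0
                        < (scores.take (scores.takeWhile (fun s => a ≤ s)).length ++ [a]).getD j 0))) : Int) := by
  set tw := scores.takeWhile (fun s => a ≤ s) with htw
  have hlen : (tw ++ [a]).length - 1 = tw.length := by simp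
  have hcnt : pvDesc (tw ++ [a])
      = (((List.range tw.length).countP
          (fun j => decide ((tw ++ [a]).getD (j+1) 0 < (tw ++ [a]).getD j 0))) : Int) := by
    rw [pvDesc_eq_countP, hlen]
  unfold count_rank_alt
  rw [altGo_spec]
  rw [take_takeWhile_len, ← htw, ← hcnt, pvDesc_snoc]
  simp only [pvLastO, pvDescO]
  cases h : tw.getLast? with
  | none => simp
  | some p => by_cases hp : a < p <;> simp [hp] <;> ring

-- ===== VERDICT (by name: the statement is the Claim_ definition above) =====
theorem count_rank_spec : Claim_equal_count_rank := by
  intro scores alice_score _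
  unfold Spec_count_rank
  rw [A_val, B_val]
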